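-- pv_equiv track=rewrite | github.com/Lukaeric14/abundance-v2 | generate-projectv2/01_spec_builder_node/spec_builder_node.py | _extract_science_skills
-- ===== SOURCE A (Python) =====
-- from typing import Dict, List
--
-- def _extract_science_skills(topic: str) -> List[str]:
--     """Extract science-specific skills"""
--     skills = ['scientific_method']  # Always include this
--
--     if any(word in topic for word in ['experiment', 'test', 'hypothesis']):
--         skills.append('experimental_design')
--     if any(word in topic for word in ['observe', 'measure', 'data']):
--         skills.append('data_collection')
--     if any(word in topic for word in ['conclude', 'analyze', 'interpret']):
--         skills.append('data_analysis')
--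
--     return skills
-- ===== SOURCE B (Python) =====
-- from typing import Dict, List
--
-- # Staged keyword->skill map: collect matched skills into a set in one keyword scan,
-- # then emit skills in canonical order.
-- _KEYWORD_TO_SKILL = {
--     'experiment': 'experimental_design',
--     'test': 'experimental_design',
--     'hypothesis': 'experimental_design',
--     'observe': 'data_collection',
--     'measure': 'data_collection',
--     'data': 'data_collection',
--     'conclude': 'data_analysis',
--     'analyze': 'data_analysis',
--     'interpret': 'data_analysis',
-- }
-- _SKILL_ORDER = ['experimental_design', 'data_collection', 'data_analysis']
--
-- def _extract_science_skills(topic: str) -> List[str]: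
--     hit = {skill for word, skill in _KEYWORD_TO_SKILL.items() if word in topic}
--     return ['scientific_method'] + [s for s in _SKILL_ORDER if s in hit]
-- ===== Notes on version B (the rewrite author's own statement) =====
-- stated objective: alternative
-- what changed: Instead of per-skill if-branches with any() over keyword groups, B inverts the mapping: one scan over a keyword->skill dict collects matched skills into a set, then a second pass emits skills in canonical order.
import Mathlib
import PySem

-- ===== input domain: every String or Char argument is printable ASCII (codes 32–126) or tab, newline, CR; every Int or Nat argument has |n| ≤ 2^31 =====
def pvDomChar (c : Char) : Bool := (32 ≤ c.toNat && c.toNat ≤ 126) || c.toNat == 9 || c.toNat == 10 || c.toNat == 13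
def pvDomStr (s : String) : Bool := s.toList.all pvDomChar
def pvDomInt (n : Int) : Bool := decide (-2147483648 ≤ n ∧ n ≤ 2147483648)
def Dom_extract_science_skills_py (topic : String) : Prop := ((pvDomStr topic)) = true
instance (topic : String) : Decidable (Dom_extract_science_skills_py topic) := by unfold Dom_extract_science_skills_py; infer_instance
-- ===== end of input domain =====

-- B inverts the mapping: one scan over a keyword->skill dict collects matched skills into a set,
-- then skills are emitted in canonical order (alternative decomposition; same cost).

-- ===== PORT A =====
def extract_science_skills_py (topic : String) : List String :=
  let skills := ["scientific_method"]
  let skills := if ["experiment", "test", "hypothesis"].any (fun w => PySem.Str.isIn w topic) then skills ++ ["experimental_design"] else skills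
  let skills := if ["observe", "measure", "data"].any (fun w => PySem.Str.isIn w topic) then skills ++ ["data_collection"] else skills
  let skills := if ["conclude", "analyze", "interpret"].any (fun w => PySem.Str.isIn w topic) then skills ++ ["data_analysis"] else skills
  skills

-- ===== PORT B =====
-- the keyword -> skill dict of Source B (insertion order)
def pvKeywordToSkill : List (String × String) :=
  [("experiment", "experimental_design"), ("test", "experimental_design"), ("hypothesis", "experimental_design"),
   ("observe", "data_collection"), ("measure", "data_collection"), ("data", "data_collection"),
   ("conclude", "data_analysis"), ("analyze", "data_analysis"), ("interpret", "data_analysis")]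

def pvSkillOrder : List String := ["experimental_design", "data_collection", "data_analysis"]

-- Source B's set comprehension over the dict's items (insertion order)
def pvHit (topic : String) : PySem.Set String :=
  pvKeywordToSkill.foldl (fun s p => if PySem.Str.isIn p.1 topic then PySem.Set.add s p.2 else s) PySem.Set.empty

def extract_science_skills_py_alt (topic : String) : List String :=
  "scientific_method" :: pvSkillOrder.filter (fun t => PySem.Set.contains (pvHit topic) t)

-- ===== PRECONDITION & SPEC =====
def Spec_extract_science_skills_py (topic : String) (out : List String) : Prop := out = extract_science_skills_py_alt topic
instance (topic : String) (out : List String) : Decidable (Spec_extract_science_skills_py topic out) := by unfold Spec_extract_science_skills_py; infer_instance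

-- ===== CLAIM (what is proved, stated in full; the proofs are below) =====
def Claim_equal_extract_science_skills_py : Prop := ∀ (topic : String), Dom_extract_science_skills_py topic → Spec_extract_science_skills_py topic (extract_science_skills_py topic)

-- ===== LEMMAS AND PROOFS =====

-- contains after a set add, at the Bool level
theorem pv_contains_add (s : PySem.Set String) (x y : String) :
    PySem.Set.contains (PySem.Set.add s x) y = (PySem.Set.contains s y || x == y) := by
  rw [Bool.eq_iff_iff]
  simp only [PySem.Set.contains_iff, PySem.Set.mem_add, Bool.or_eq_true, beq_iff_eq]
  tauto

-- contains after Source B's keyword fold: tag collected iff it was there or some matching keyword maps to it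
theorem pv_contains_fold (topic tag : String) (l : List (String × String)) (s0 : PySem.Set String) :
    PySem.Set.contains
        (l.foldl (fun s p => if PySem.Str.isIn p.1 topic then PySem.Set.add s p.2 else s) s0) tag
      = (PySem.Set.contains s0 tag || l.any (fun p => PySem.Str.isIn p.1 topic && p.2 == tag)) := by
  induction l generalizing s0 with
  | nil => simp
  | cons p t ih =>
      rw [List.foldl_cons, List.any_cons]
      cases hi : PySem.Str.isIn p.1 topic with
      | false =>
          rw [if_neg (fun h => nomatch h), ih]
          simp only [Bool.false_and, Bool.false_or]
      | true =>
          rw [if_pos rfl, ih, pv_contains_add]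
          simp only [Bool.true_and, Bool.or_assoc]

theorem pv_hit_exp (topic : String) :
    PySem.Set.contains (pvHit topic) "experimental_design" =
      (["experiment", "test", "hypothesis"].any (fun w => PySem.Str.isIn w topic)) := by
  unfold pvHit pvKeywordToSkill
  rw [pv_contains_fold]
  simp only [List.any_cons, List.any_nil]
  simp

theorem pv_hit_coll (topic : String) :
    PySem.Set.contains (pvHit topic) "data_collection" =
      (["observe", "measure", "data"].any (fun w => PySem.Str.isIn w topic)) := by
  unfold pvHit pvKeywordToSkill
  rw [pv_contains_fold]
  simp only [List.any_cons, List.any_nil]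
  simp

theorem pv_hit_ana (topic : String) :
    PySem.Set.contains (pvHit topic) "data_analysis" =
      (["conclude", "analyze", "interpret"].any (fun w => PySem.Str.isIn w topic)) := by
  unfold pvHit pvKeywordToSkill
  rw [pv_contains_fold]
  simp only [List.any_cons, List.any_nil]
  simp

-- ===== VERDICT (by name: the statement is the Claim_ definition above) =====
theorem extract_science_skills_py_spec : Claim_equal_extract_science_skills_py := by
  intro topic _
  unfold Spec_extract_science_skills_py extract_science_skills_py extract_science_skills_py_alt
  simp only [pvSkillOrder, List.filter_cons, List.filter_nil, pv_hit_exp, pv_hit_coll, pv_hit_ana]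
  cases hb1 : ["experiment", "test", "hypothesis"].any (fun w => PySem.Str.isIn w topic) <;>
    cases hb2 : ["observe", "measure", "data"].any (fun w => PySem.Str.isIn w topic) <;>
      cases hb3 : ["conclude", "analyze", "interpret"].any (fun w => PySem.Str.isIn w topic) <;>
        rfl
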